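-- pv_equiv track=rewrite | github.com/onahprosper/DSA | word_frequency.py | findMostFrequentWord
-- ===== SOURCE A (Python) =====
-- from typing import List, Dict
--
-- def findMostFrequentWord(inputList1: List[str], inputList2: List[str]) -> str:
--     # We first need to count the frequency of each word in inputList1 and store it in a dictionary
--     # This way we can easily find the most frequent word later
--     word_counts = {}
--     for word in inputList1:
--         if word in word_counts:
--             word_counts[word] = word_counts[word] + 1
--         else:
--             word_counts[word] = 1
--
--     # Find most frequent word not in inputList2
--     most_frequent_word = None
--     max_count = 0
--
--     for word in word_counts:
--         count = word_counts[word]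
--
--         # We need to check if a word from the word_counts is in the inputList2, then we exclude such words
--         word_is_excluded = False
--         for excluded_word in inputList2:
--             # What we are doing here is to compare the current word with each excluded word
--             if word == excluded_word:
--                 word_is_excluded = True
--                 break
--
--         # If not excluded and has higher count, update most frequent word
--         if not word_is_excluded and count > max_count:
--             max_count = count
--             most_frequent_word = word
--
--     return most_frequent_word if most_frequent_word else ""
-- ===== SOURCE B (Python) =====
-- def findMostFrequentWord(inputList1, inputList2):
--     excluded = set(inputList2)
--     counts = {}
--     for w in inputList1:
--         counts[w] = counts.get(w, 0) + 1
--     for w in sorted(counts, key=lambda w: -counts[w]):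
--         if w not in excluded:
--             return w
--     return ""
-- ===== Notes on version B (the rewrite author's own statement) =====
-- stated objective: faster
-- what changed: Replaces A's manual max/count tracking with its per-word linear rescan of inputList2 by a sort-then-scan strategy: build the frequency table, stably sort the words by descending count, and return the first word of that order not in an exclusion set built once from inputList2.
import Mathlib
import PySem

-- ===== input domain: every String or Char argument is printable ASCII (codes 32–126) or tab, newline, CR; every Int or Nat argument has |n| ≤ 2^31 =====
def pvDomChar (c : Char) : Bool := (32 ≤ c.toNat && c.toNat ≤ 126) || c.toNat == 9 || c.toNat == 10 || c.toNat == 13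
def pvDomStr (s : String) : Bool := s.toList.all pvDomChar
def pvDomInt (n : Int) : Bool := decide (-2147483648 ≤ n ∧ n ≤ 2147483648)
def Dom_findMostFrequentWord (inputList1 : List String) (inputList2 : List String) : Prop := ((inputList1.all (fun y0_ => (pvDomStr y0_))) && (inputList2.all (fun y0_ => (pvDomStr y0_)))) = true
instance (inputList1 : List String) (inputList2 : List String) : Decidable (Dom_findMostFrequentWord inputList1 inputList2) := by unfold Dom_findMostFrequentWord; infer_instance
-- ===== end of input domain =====

-- B replaces A's manual max/count tracking with its per-word rescan of inputList2 by
-- sort-then-scan: stably sort the counted words by descending count and return the first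
-- one not in an exclusion set built once (alternative decomposition, same return value).

-- ===== PORT A =====
def findMostFrequentWord (inputList1 : List String) (inputList2 : List String) : String :=
  let word_counts : PySem.Dict String Int :=
    inputList1.foldl (fun d word =>
      if d.contains word then d.insert word (d.getD word 0 + 1)
      else d.insert word 1) PySem.Dict.empty
  -- state: (most_frequent_word, max_count); the inner for/break over inputList2 is List.any
  let st := (PySem.Dict.keys word_counts).foldl
    (fun (st : Option String × Int) word =>
      let count := word_counts.getD word 0
      let word_is_excluded := inputList2.any (fun excluded_word => word == excluded_word)
      if !word_is_excluded && decide (st.2 < count) then (some word, count) else st)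
    (none, 0)
  match st.1 with
  | some w => if w == "" then "" else w   -- `x if x else ""`: the only falsy str is ""
  | none => ""

-- ===== PORT B =====
def findMostFrequentWord_alt (inputList1 : List String) (inputList2 : List String) : String :=
  let excluded : PySem.Set String := PySem.Set.ofList inputList2
  let counts : PySem.Dict String Int :=
    inputList1.foldl (fun d w => d.insert w (d.getD w 0 + 1)) PySem.Dict.empty
  let ordered := PySem.List.sorted (PySem.Dict.keys counts) (fun w => -(counts.getD w 0)) false
  -- the for/return loop over `ordered` is find?; the fallthrough return is the none case
  match ordered.find? (fun w => !(PySem.Set.contains excluded w)) with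
  | some w => w
  | none => ""

-- ===== PRECONDITION & SPEC =====
def Spec_findMostFrequentWord (inputList1 : List String) (inputList2 : List String) (out : String) : Prop := out = findMostFrequentWord_alt inputList1 inputList2
instance (inputList1 : List String) (inputList2 : List String) (out : String) : Decidable (Spec_findMostFrequentWord inputList1 inputList2 out) := by unfold Spec_findMostFrequentWord; infer_instance

-- ===== CLAIM (what is proved, stated in full; the proofs are below) =====
def Claim_equal_findMostFrequentWord : Prop := ∀ (inputList1 : List String) (inputList2 : List String), Dom_findMostFrequentWord inputList1 inputList2 → Spec_findMostFrequentWord inputList1 inputList2 (findMostFrequentWord inputList1 inputList2)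

-- ===== LEMMAS AND PROOFS =====

-- A's counting step (branch on membership) is the plain counter step.
theorem countStep_eq :
    (fun (d : PySem.Dict String Int) word =>
      if d.contains word then d.insert word (d.getD word 0 + 1)
      else d.insert word 1) =
    (fun (d : PySem.Dict String Int) w => d.insert w (d.getD w 0 + 1)) := by
  funext d w
  by_cases h : d.contains w = true
  · simp [h]
  · simp only [Bool.not_eq_true] at h
    rw [if_neg (by simp [h]), PySem.Dict.getD_of_not_contains d 0 h]
    norm_num

-- one step of the first-maximal-element fold (= the step inside PySem.List.max?)
def maxStep (c : String → Int) (a : Option String) (x : String) : Option String :=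
  match a with
  | none => some x
  | some m => if c m < c x then some x else some m

-- A's max-tracking fold over ks equals the first-maximal fold over the p-filtered list,
-- provided every key value is positive and the carried count matches the carried word.
theorem loop_eq (p : String → Bool) (c : String → Int) :
    ∀ (ks : List String) (m : Option String) (v : Int),
      (∀ w ∈ ks, 0 < c w) →
      (m = none → v = 0) → (∀ x, m = some x → v = c x) →
      (ks.foldl (fun st w =>
          if p w && decide (st.2 < c w) then (some w, c w) else st) (m, v)).1 =
        (ks.filter p).foldl (maxStep c) m := by
  intro ks
  induction ks with
  | nil =>
    intro m v _ _ _
    simp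
  | cons w ks ih =>
    intro m v hpos hnone hsome
    have hpos' : ∀ y ∈ ks, 0 < c y := fun y hy => hpos y (by simp [hy])
    by_cases hp : p w = true
    · cases m with
      | none =>
        have hv : v = 0 := hnone rfl
        subst hv
        have hcw : 0 < c w := hpos w (by simp)
        rw [List.foldl_cons, if_pos (by simp [hp]; exact hcw),
          List.filter_cons_of_pos hp, List.foldl_cons,
          ih (some w) (c w) hpos' (by simp) (fun x hx => by injection hx with h; rw [h])]
        rfl
      | some x =>
        have hv : v = c x := hsome x rfl
        subst hv
        by_cases hlt : c x < c w
        · rw [List.foldl_cons, if_pos (by simp [hp]; exact hlt),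
            List.filter_cons_of_pos hp, List.foldl_cons,
            ih (some w) (c w) hpos' (by simp) (fun y hy => by injection hy with h; rw [h])]
          simp [maxStep, hlt]
        · rw [List.foldl_cons, if_neg (by simp [hp]; omega),
            List.filter_cons_of_pos hp, List.foldl_cons,
            ih (some x) (c x) hpos' (by simp) (fun y hy => by injection hy with h; rw [h])]
          simp [maxStep, hlt]
    · have hp' : p w = false := by revert hp; cases p w <;> simp
      rw [List.foldl_cons, if_neg (by simp [hp']),
        List.filter_cons_of_neg (by simp [hp']),
        ih m v hpos' hnone hsome]

-- both exclusion tests decide membership in inputList2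
theorem excl_eq (l2 : List String) :
    (fun w => !(l2.any (fun e => w == e))) =
    (fun w => !(PySem.Set.contains (PySem.Set.ofList l2) w)) := by
  funext w
  have h1 : l2.any (fun e => w == e) = decide (w ∈ l2) := by
    rw [Bool.eq_iff_iff]; simp
  have h2 : PySem.Set.contains (PySem.Set.ofList l2) w = decide (w ∈ l2) := by
    simp only [PySem.Set.contains, List.contains_eq_mem, PySem.Set.mem_ofList]
  rw [h1, h2]

-- inserting an element failing p does not change the first p-element
theorem find?_insertBy_neg (B : String → String → Bool) (p : String → Bool)
    (x : String) (hx : p x = false) :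
    ∀ (s : List String), (PySem.List.insertBy B x s).find? p = s.find? p := by
  intro s
  induction s with
  | nil => simp [PySem.List.insertBy, List.find?, hx]
  | cons y t ih =>
    by_cases hb : B x y = true
    · simp [PySem.List.insertBy, hb, List.find?, hx]
    · have hb' : B x y = false := by revert hb; cases B x y <;> simp
      cases hpy : p y with
      | true => simp [PySem.List.insertBy, hb', hpy]
      | false => simp [PySem.List.insertBy, hb', hpy, ih]

-- inserting (by descending c, after ties) an element satisfying p updates the first
-- p-element exactly like one maxStep, on a descending-sorted list
theorem find?_insertBy_pos (c : String → Int) (p : String → Bool)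
    (x : String) (hx : p x = true) :
    ∀ (s : List String), s.Pairwise (fun a b => c b ≤ c a) →
      (PySem.List.insertBy (fun a b => decide (c b < c a)) x s).find? p =
        maxStep c (s.find? p) x := by
  intro s
  induction s with
  | nil => simp [PySem.List.insertBy, List.find?, hx, maxStep]
  | cons y t ih =>
    intro hpw
    rw [List.pairwise_cons] at hpw
    obtain ⟨hyt, hpt⟩ := hpw
    by_cases hb : c y < c x
    · rw [show PySem.List.insertBy (fun a b => decide (c b < c a)) x (y :: t) =
            x :: y :: t by simp [PySem.List.insertBy, hb]]
      rw [List.find?_cons_of_pos hx]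
      cases hfy : (y :: t).find? p with
      | none => rfl
      | some m =>
        have hm : m ∈ y :: t := List.mem_of_find?_eq_some hfy
        have hmy : c m ≤ c y := by
          rcases List.mem_cons.mp hm with h | h
          · rw [h]
          · exact hyt m h
        simp [maxStep, show c m < c x by omega]
    · rw [show PySem.List.insertBy (fun a b => decide (c b < c a)) x (y :: t) =
            y :: PySem.List.insertBy (fun a b => decide (c b < c a)) x t by
          simp [PySem.List.insertBy, hb]]
      cases hpy : p y with
      | true =>
        rw [List.find?_cons_of_pos hpy, List.find?_cons_of_pos hpy]
        simp [maxStep, show ¬ (c y < c x) from hb]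
      | false =>
        rw [List.find?_cons_of_neg (by simp [hpy]), List.find?_cons_of_neg (by simp [hpy]),
          ih hpt]

-- the first p-element of the stable descending-count sort is the first maximal p-element
theorem sorted_find?_eq (c : String → Int) (p : String → Bool) (ks : List String) :
    (PySem.List.sorted ks (fun w => -(c w)) false).find? p =
      (ks.filter p).foldl (maxStep c) none := by
  induction ks using List.reverseRecOn with
  | nil => simp [PySem.List.sorted]
  | append_singleton ks x ih =>
    have hfn : (fun (a b : String) => decide (-(c a) < -(c b))) =
        (fun a b => decide (c b < c a)) := by
      funext a b; rw [Bool.eq_iff_iff]; constructor <;> (intro h; simp at h ⊢; omega)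
    have hsplit : PySem.List.sorted (ks ++ [x]) (fun w => -(c w)) false =
        PySem.List.insertBy (fun a b => decide (c b < c a)) x
          (PySem.List.sorted ks (fun w => -(c w)) false) := by
      rw [PySem.List.sorted_eq_foldl_insertBy, PySem.List.sorted_eq_foldl_insertBy, hfn,
        List.foldl_append, List.foldl_cons, List.foldl_nil]
    have hpw : (PySem.List.sorted ks (fun w => -(c w)) false).Pairwise
        (fun a b => c b ≤ c a) := by
      have := PySem.List.sorted_pairwise ks (fun w => -(c w))
      exact this.imp (fun h => by omega)
    rw [hsplit]
    cases hpx : p x with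
    | true =>
      rw [find?_insertBy_pos c p x hpx _ hpw, ih,
        List.filter_append, List.filter_cons_of_pos hpx, List.filter_nil,
        List.foldl_append, List.foldl_cons, List.foldl_nil]
    | false =>
      rw [find?_insertBy_neg _ p x hpx, ih,
        List.filter_append, List.filter_cons_of_neg (by simp [hpx]), List.filter_nil,
        List.foldl_append, List.foldl_nil]

-- ===== VERDICT (by name: the statement is the Claim_ definition above) =====
theorem findMostFrequentWord_spec : Claim_equal_findMostFrequentWord := by
  intro l1 l2 _
  unfold Spec_findMostFrequentWord findMostFrequentWord findMostFrequentWord_alt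
  dsimp only
  rw [countStep_eq]
  set C : PySem.Dict String Int :=
    l1.foldl (fun d w => d.insert w (d.getD w 0 + 1)) PySem.Dict.empty with hC
  have hpos : ∀ w ∈ PySem.Dict.keys C, 0 < C.getD w 0 := by
    intro w hw
    have hk : PySem.Dict.keys C = PySem.Set.ofList l1 := by
      rw [hC, PySem.Dict.keys_foldl_insert]
      simp [PySem.Set.update, PySem.Set.ofList_eq_foldl, PySem.Dict.keys_empty]
    have hmem : w ∈ l1 := by
      rw [hk] at hw; exact (PySem.Set.mem_ofList l1 w).mp hw
    have hcnt : C.getD w 0 = PySem.Dict.getD PySem.Dict.empty w 0 + (l1.count w : Int) := by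
      rw [hC, PySem.Dict.getD_foldl_insert_add_one]
    have hc : 0 < l1.count w := List.count_pos_iff.mpr hmem
    rw [hcnt, PySem.Dict.getD_empty]
    omega
  have key := loop_eq (fun w => !(l2.any (fun e => w == e))) (fun w => C.getD w 0)
    (PySem.Dict.keys C) none 0 hpos (fun _ => rfl) (fun x hx => by cases hx)
  rw [key, excl_eq l2, ← sorted_find?_eq (fun w => C.getD w 0)
    (fun w => !(PySem.Set.contains (PySem.Set.ofList l2) w)) (PySem.Dict.keys C)]
  set o := (PySem.List.sorted (PySem.Dict.keys C) (fun w => -(C.getD w 0)) false).find?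
      (fun w => !(PySem.Set.contains (PySem.Set.ofList l2) w)) with ho
  cases o with
  | none => rfl
  | some w =>
    by_cases hw : w = ""
    · simp [hw]
    · simp [hw]
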